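-- pv_equiv track=rewrite | github.com/fyangss/questions | python/hr/algorithms/mars_exploration_easy.py | marsExploration
-- ===== SOURCE A (Python) =====
-- def marsExploration(s):
--   msg = 'SOS'
--   mi = 0
--   counter = 0
--   for i in s:
--     if i != msg[mi]:
--       counter += 1
--     mi = (mi + 1) % 3
--   return counter
-- ===== SOURCE B (Python) =====
-- def marsExploration(s):
--     total = 0
--     for k in range(0, len(s), 3):
--         total += sum(a != b for a, b in zip(s[k:k+3], 'SOS'))
--     return total
-- ===== Notes on version B (the rewrite author's own statement) =====
-- stated objective: alternative
-- what changed: Replaced the per-character mod-3 state machine with a chunked pass: iterate over range(0, len(s), 3) and count the mismatches of each 3-character slice against the pattern via zip.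
import Mathlib
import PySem

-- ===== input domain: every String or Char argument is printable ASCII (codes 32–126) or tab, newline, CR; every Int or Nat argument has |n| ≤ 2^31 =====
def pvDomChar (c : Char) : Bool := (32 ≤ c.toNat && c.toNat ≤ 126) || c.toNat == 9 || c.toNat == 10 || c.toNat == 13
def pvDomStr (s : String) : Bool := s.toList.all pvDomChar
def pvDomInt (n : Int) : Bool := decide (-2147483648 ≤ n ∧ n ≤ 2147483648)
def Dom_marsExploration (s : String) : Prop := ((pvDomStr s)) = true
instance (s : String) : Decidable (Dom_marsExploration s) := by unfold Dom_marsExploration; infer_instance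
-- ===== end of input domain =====

-- B replaces A's per-character mod-3 state-machine loop with a chunked pass over range(0, len(s), 3), zip-comparing each 3-character slice with the pattern (objective: alternative decomposition, same cost).


-- ===== PORT A =====
-- Port of A: fold over the characters with state (mi, counter); msg[mi] via PySem.Str.pyGet?.
def marsExploration (s : String) : Int :=
  (s.toList.foldl
    (fun (st : Int × Int) i =>
      let counter : Int := if some i ≠ PySem.Str.pyGet? "SOS" st.1 then st.2 + 1 else st.2
      (PySem.Int.mod (st.1 + 1) 3, counter))
    (0, 0)).2

-- ===== PORT B =====
-- Port of B: sum(a != b for a, b in zip(chunk, 'SOS'))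
def pvMism (chunk : List Char) : Int :=
  ((chunk.zip "SOS".toList).map (fun p => if p.1 ≠ p.2 then (1 : Int) else 0)).sum

-- Port of B: for k in range(0, len(s), 3): total += mismatches of s[k:k+3] vs 'SOS'
def marsExploration_alt (s : String) : Int :=
  (PySem.List.pyRange 0 (s.toList.length : Int) 3).foldl
    (fun total k => total + pvMism (PySem.List.slice s.toList (some k) (some (k + 3)))) 0

-- ===== PRECONDITION & SPEC =====
def Spec_marsExploration (s : String) (out : Int) : Prop := out = marsExploration_alt s
instance (s : String) (out : Int) : Decidable (Spec_marsExploration s out) := by unfold Spec_marsExploration; infer_instance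

-- ===== CLAIM (what is proved, stated in full; the proofs are below) =====
def Claim_equal_marsExploration : Prop := ∀ (s : String), Dom_marsExploration s → Spec_marsExploration s (marsExploration s)

-- ===== LEMMAS AND PROOFS =====

-- chunk-by-chunk characterisation both ports are reduced to
def pvChunk : List Char → Int
  | [] => 0
  | a :: t => pvMism (a :: t.take 2) + pvChunk (t.drop 2)
termination_by l => l.length
decreasing_by simp

lemma pvA_fold (l : List Char) (acc : Int) :
    (l.foldl
      (fun (st : Int × Int) i =>
        let counter : Int := if some i ≠ PySem.Str.pyGet? "SOS" st.1 then st.2 + 1 else st.2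
        (PySem.Int.mod (st.1 + 1) 3, counter))
      (0, acc)).2 = acc + pvChunk l := by
  have e0 : PySem.Str.pyGet? "SOS" 0 = some 'S' := by decide
  have e1 : PySem.Str.pyGet? "SOS" 1 = some 'O' := by decide
  have e2 : PySem.Str.pyGet? "SOS" 2 = some 'S' := by decide
  have m1 : PySem.Int.mod (0+1) 3 = 1 := by decide
  have m2 : PySem.Int.mod (1+1) 3 = 2 := by decide
  have m3 : PySem.Int.mod (2+1) 3 = 0 := by decide
  match l with
  | [] => simp [pvChunk]
  | [a] =>
    simp only [List.foldl_cons, List.foldl_nil, e0]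
    simp [pvChunk, pvMism]
    split_ifs <;> omega
  | [a,b] =>
    simp only [List.foldl_cons, List.foldl_nil, e0, m1, e1]
    simp [pvChunk, pvMism]
    split_ifs <;> omega
  | a :: b :: c :: rest =>
    have ih := pvA_fold rest
    simp only [List.foldl_cons, e0, m1, e1, m2, e2, m3]
    rw [ih]
    simp [pvChunk, pvMism]
    split_ifs <;> omega
termination_by l.length
decreasing_by simp <;> omega

lemma pvB_fold (l : List Char) (acc : Int) :
    (List.range (if (0:Int) < (l.length : Int) then (((l.length : Int) - 0 + 3 - 1) / 3).toNat else 0)).foldl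
      (fun total j => total + pvMism ((l.drop (3 * j)).take 3)) acc = acc + pvChunk l := by
  match l with
  | [] => simp [pvChunk]
  | a :: t =>
    have ih := pvB_fold (t.drop 2)
    have hcnt : (if (0:Int) < ((a :: t).length : Int) then ((((a :: t).length : Int) - 0 + 3 - 1) / 3).toNat else 0)
        = (if (0:Int) < ((t.drop 2).length : Int) then ((((t.drop 2).length : Int) - 0 + 3 - 1) / 3).toNat else 0) + 1 := by
      simp only [List.length_cons, List.length_drop]
      split_ifs <;> push_cast <;> omega
    rw [hcnt, List.range_succ_eq_map, List.foldl_cons, List.foldl_map]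
    have hfun : (fun (total : Int) (j : Nat) => total + pvMism (((a :: t).drop (3 * (j + 1))).take 3))
        = (fun (total : Int) (j : Nat) => total + pvMism (((t.drop 2).drop (3 * j)).take 3)) := by
      funext total j
      have h : ((a :: t).drop (3 * (j + 1))) = ((t.drop 2).drop (3 * j)) := by
        rw [List.drop_drop, show 3 * (j + 1) = (3 * j + 2) + 1 from by ring, List.drop_succ_cons]
        congr 1
        omega
      rw [h]
    simp only [Nat.succ_eq_add_one] at *
    rw [hfun, ih]
    simp [pvChunk]
    ring
termination_by l.length
decreasing_by simp

-- ===== VERDICT (by name: the statement is the Claim_ definition above) =====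
theorem marsExploration_spec : Claim_equal_marsExploration := by
  intro s _
  unfold Spec_marsExploration marsExploration marsExploration_alt
  rw [pvA_fold s.toList 0]
  rw [PySem.List.pyRange_of_pos 0 ((s.toList.length : Int)) (by norm_num), List.foldl_map]
  have hfun : (fun (total : Int) (k : Nat) =>
        total + pvMism (PySem.List.slice s.toList (some ((0:Int) + 3 * (k:Int))) (some ((0:Int) + 3 * (k:Int) + 3))))
      = (fun (total : Int) (j : Nat) => total + pvMism ((s.toList.drop (3 * j)).take 3)) := by
    funext total j
    have c1 : ((0:Int) + 3 * (j:Int)) = ((3 * j : Nat) : Int) := by push_cast; ring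
    have c2 : (((3 * j : Nat) : Int) + 3) = ((3 * j : Nat) : Int) + ((3 : Nat) : Int) := by norm_num
    rw [c1, c2, PySem.List.slice_natCast_add]
  rw [hfun, pvB_fold]
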